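-- pv_equiv track=rewrite | github.com/cnp777/CS303E-Elements-of-Comptrs-Programmng-Wb | MockExam2_mine.py | divBy3And5
-- ===== SOURCE A (Python) =====
-- def divBy3And5(lst):
--
--     if not lst:
--         return 0,0
--
--     elif lst[0] % 3 == 0 and not lst[0] % 5 == 0:
--         x, y = divBy3And5(lst[1:])
--         return x + 1,y
--     elif lst[0] % 5 == 0 and not lst[0] % 3 == 0:
--         x, y = divBy3And5(lst[1:])
--         return x,y + 1
--     elif lst[0] % 3 == 0 and lst[0] % 5 == 0:
--         x, y = divBy3And5(lst[1:])
--         return x + 1, y + 1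
--     else:
--         x, y = divBy3And5(lst[1:])
--         return x,y
-- ===== SOURCE B (Python) =====
-- def divBy3And5(lst):
--     c3 = 0
--     c5 = 0
--     for v in lst:
--         if v % 3 == 0:
--             c3 += 1
--         if v % 5 == 0:
--             c5 += 1
--     return c3, c5
-- ===== Notes on version B (the rewrite author's own statement) =====
-- stated objective: simpler
-- what changed: Replaced the recursive case-split over four divisibility branches with a single iterative loop keeping two independent counters.
import Mathlib
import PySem

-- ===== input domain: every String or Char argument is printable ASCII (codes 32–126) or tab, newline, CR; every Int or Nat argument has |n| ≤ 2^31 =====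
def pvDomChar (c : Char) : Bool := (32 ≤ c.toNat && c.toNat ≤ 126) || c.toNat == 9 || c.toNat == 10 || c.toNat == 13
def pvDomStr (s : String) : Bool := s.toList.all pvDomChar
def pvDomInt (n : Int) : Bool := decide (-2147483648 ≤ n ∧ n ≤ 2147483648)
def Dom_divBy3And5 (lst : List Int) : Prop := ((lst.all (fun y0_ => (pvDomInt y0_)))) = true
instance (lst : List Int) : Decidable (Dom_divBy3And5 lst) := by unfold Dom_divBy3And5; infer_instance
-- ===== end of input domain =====

-- B replaces A's four-branch recursion (with per-step list slicing) by a single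
-- iterative loop over the list with two independent counters; simpler and O(n).

-- ===== PORT A =====
def divBy3And5 (lst : List Int) : Int × Int :=
  match lst with
  | [] => (0, 0)
  | h :: t =>
    if PySem.Int.mod h 3 = 0 ∧ ¬ PySem.Int.mod h 5 = 0 then
      let (x, y) := divBy3And5 t
      (x + 1, y)
    else if PySem.Int.mod h 5 = 0 ∧ ¬ PySem.Int.mod h 3 = 0 then
      let (x, y) := divBy3And5 t
      (x, y + 1)
    else if PySem.Int.mod h 3 = 0 ∧ PySem.Int.mod h 5 = 0 then
      let (x, y) := divBy3And5 t
      (x + 1, y + 1)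
    else
      let (x, y) := divBy3And5 t
      (x, y)

-- ===== PORT B =====
def pvStep (cs : Int × Int) (v : Int) : Int × Int :=
  let c3 := if PySem.Int.mod v 3 = 0 then cs.1 + 1 else cs.1
  let c5 := if PySem.Int.mod v 5 = 0 then cs.2 + 1 else cs.2
  (c3, c5)

def divBy3And5_alt (lst : List Int) : Int × Int :=
  lst.foldl pvStep (0, 0)

-- ===== PRECONDITION & SPEC =====
def Spec_divBy3And5 (lst : List Int) (out : Int × Int) : Prop := out = divBy3And5_alt lst
instance (lst : List Int) (out : Int × Int) : Decidable (Spec_divBy3And5 lst out) := by unfold Spec_divBy3And5; infer_instance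

-- ===== CLAIM (what is proved, stated in full; the proofs are below) =====
def Claim_equal_divBy3And5 : Prop := ∀ (lst : List Int), Dom_divBy3And5 lst → Spec_divBy3And5 lst (divBy3And5 lst)

-- ===== LEMMAS AND PROOFS =====

-- Proof-only characterisation: the two counts as filter lengths.
def pvCnt3 (lst : List Int) : Int := ((lst.filter (fun v => PySem.Int.mod v 3 = 0)).length : Int)
def pvCnt5 (lst : List Int) : Int := ((lst.filter (fun v => PySem.Int.mod v 5 = 0)).length : Int)

theorem alt_foldl_shift (lst : List Int) (a b : Int) :
    lst.foldl pvStep (a, b) = (a + pvCnt3 lst, b + pvCnt5 lst) := by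
  induction lst generalizing a b with
  | nil => simp [pvCnt3, pvCnt5]
  | cons h t ih =>
    simp only [List.foldl_cons, pvStep]
    rw [ih]
    simp only [pvCnt3, pvCnt5, List.filter_cons]
    split_ifs <;> simp_all [Prod.ext_iff] <;> omega

theorem alt_eq_counts (lst : List Int) : divBy3And5_alt lst = (pvCnt3 lst, pvCnt5 lst) := by
  simpa using alt_foldl_shift lst 0 0

theorem a_eq_counts (lst : List Int) : divBy3And5 lst = (pvCnt3 lst, pvCnt5 lst) := by
  induction lst with
  | nil => simp [divBy3And5, pvCnt3, pvCnt5]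
  | cons h t ih =>
    simp only [divBy3And5, ih, pvCnt3, pvCnt5, List.filter_cons]
    by_cases h3 : (3 : Int) ∣ h <;> by_cases h5 : (5 : Int) ∣ h <;>
      simp [h3, h5]

-- ===== VERDICT (by name: the statement is the Claim_ definition above) =====
theorem divBy3And5_spec : Claim_equal_divBy3And5 := by
  intro lst _
  unfold Spec_divBy3And5
  rw [a_eq_counts, alt_eq_counts]
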